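-- pv_equiv track=rewrite | github.com/J3V2/CBS_Simulation | cbs_enchancement.py | detect_conflicts
-- ===== SOURCE A (Python) =====
-- def detect_conflicts(paths):
--     """Detect conflicts among agents."""
--     conflicts = []
--     max_time = max(len(path) for path in paths)
--     for t in range(max_time):
--         positions = {}
--         for agent_id, path in enumerate(paths):
--             if t < len(path):
--                 position = path[t]
--                 if position in positions:
--                     conflicts.append((positions[position], agent_id, position, t))
--                 else:
--                     positions[position] = agent_id
--     return conflicts
-- ===== SOURCE B (Python) =====
-- def detect_conflicts(paths):
--     """Detect conflicts among agents."""
--     groups = {}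
--     for agent_id, path in enumerate(paths):
--         for t, pos in enumerate(path):
--             key = (t, pos)
--             if key in groups:
--                 groups[key].append(agent_id)
--             else:
--                 groups[key] = [agent_id]
--     conflicts = []
--     for (t, pos), agents in groups.items():
--         first = agents[0]
--         for other in agents[1:]:
--             conflicts.append((first, other, pos, t))
--     conflicts.sort(key=lambda c: (c[3], c[1]))
--     return conflicts
-- ===== Notes on version B (the rewrite author's own statement) =====
-- stated objective: alternative
-- what changed: B replaces A's timestep-major sweep with its per-timestep first-occupant dict by a single pass that groups all agents into a dict keyed by (timestep, position), then emits (first, other, pos, t) pairs from each group of size >= 2 and sorts them by (timestep, second agent) to recover A's output order.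
import Mathlib
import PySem

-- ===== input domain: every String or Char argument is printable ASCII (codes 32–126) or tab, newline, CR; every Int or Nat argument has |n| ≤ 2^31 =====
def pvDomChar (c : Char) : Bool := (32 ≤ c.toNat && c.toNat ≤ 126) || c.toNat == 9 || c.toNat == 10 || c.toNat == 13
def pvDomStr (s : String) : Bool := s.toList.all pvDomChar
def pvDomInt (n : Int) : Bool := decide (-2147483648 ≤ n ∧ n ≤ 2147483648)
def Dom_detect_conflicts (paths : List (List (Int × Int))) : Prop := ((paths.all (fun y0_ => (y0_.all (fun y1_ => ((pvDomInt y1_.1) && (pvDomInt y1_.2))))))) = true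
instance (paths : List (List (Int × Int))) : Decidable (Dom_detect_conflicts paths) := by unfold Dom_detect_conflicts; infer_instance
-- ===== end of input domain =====

-- B builds one dict grouping agents by (timestep, position) in a single pass, then emits and sorts the conflict pairs (alternative algorithm; equal return values).


-- ===== PORT A =====
-- one step of A's inner 'for agent_id, path in enumerate(paths)' loop (state: conflicts so far, positions dict)
def pvInnerA (t : Int)
    (st : List (Int × Int × (Int × Int) × Int) × PySem.Dict (Int × Int) Int)
    (ap : Int × List (Int × Int)) :
    List (Int × Int × (Int × Int) × Int) × PySem.Dict (Int × Int) Int :=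
  if t < (ap.2.length : Int) then
    match PySem.List.pyGet? ap.2 t with
    | some position =>
      match st.2.get? position with
      | some first => (st.1 ++ [(first, ap.1, position, t)], st.2)
      | none => (st.1, st.2.insert position ap.1)
    | none => st
  else st

def detect_conflicts (paths : List (List (Int × Int))) : List (Int × Int × (Int × Int) × Int) :=
  match PySem.List.max? (paths.map (fun path => (path.length : Int))) (fun x => x) with
  | none => []  -- Python's max() raises ValueError here; excluded by Pre_
  | some max_time =>
    (PySem.List.pyRange 0 max_time 1).foldl
      (fun conflicts t =>
        ((PySem.List.enumerate paths 0).foldl (pvInnerA t)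
          (conflicts, (PySem.Dict.empty : PySem.Dict (Int × Int) Int))).1)
      []

-- ===== PORT B =====
-- B's 'if key in groups: groups[key].append(agent_id) else: groups[key] = [agent_id]'
def pvGroupAdd (agent_id : Int) (groups : PySem.Dict (Int × Int × Int) (List Int))
    (tp : Int × Int × Int) : PySem.Dict (Int × Int × Int) (List Int) :=
  match groups.get? tp with
  | some l => groups.insert tp (l ++ [agent_id])
  | none => groups.insert tp [agent_id]

-- B's first pass: group the agent ids by (timestep, position)
def pvGroups (paths : List (List (Int × Int))) : PySem.Dict (Int × Int × Int) (List Int) :=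
  (PySem.List.enumerate paths 0).foldl
    (fun groups ap => (PySem.List.enumerate ap.2 0).foldl (pvGroupAdd ap.1) groups)
    PySem.Dict.empty

-- B's inner 'for other in agents[1:]' loop body for one group (agents[0] with agents[1:])
def pvEmit (kv : (Int × Int × Int) × List Int) : List (Int × Int × (Int × Int) × Int) :=
  match kv.2 with
  | [] => []  -- unreachable: pvGroups never stores an empty group
  | first :: rest => rest.map (fun other => (first, other, kv.1.2, kv.1.1))

def detect_conflicts_alt (paths : List (List (Int × Int))) : List (Int × Int × (Int × Int) × Int) :=
  PySem.List.sorted2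
    ((pvGroups paths).items.foldl (fun conflicts kv => conflicts ++ pvEmit kv) [])
    (fun c => c.2.2.2) (fun c => c.2.1)

-- ===== PRECONDITION & SPEC =====
-- Pre_ excludes only the empty list of paths, on which A raises ValueError (max() of an empty sequence).
def Pre_detect_conflicts (paths : List (List (Int × Int))) : Prop := paths ≠ []
instance (paths : List (List (Int × Int))) : Decidable (Pre_detect_conflicts paths) := by unfold Pre_detect_conflicts; infer_instance
def pvWitness_detect_conflicts : (List (List (Int × Int))) := [[(0, 0), (1, 0)], [(0, 0)]]

def Spec_detect_conflicts (paths : List (List (Int × Int))) (out : List (Int × Int × (Int × Int) × Int)) : Prop := out = detect_conflicts_alt paths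
instance (paths : List (List (Int × Int))) (out : List (Int × Int × (Int × Int) × Int)) : Decidable (Spec_detect_conflicts paths out) := by unfold Spec_detect_conflicts; infer_instance

-- ===== CLAIM (what is proved, stated in full; the proofs are below) =====
def Claim_equal_detect_conflicts : Prop := ∀ (paths : List (List (Int × Int))), Dom_detect_conflicts paths → Pre_detect_conflicts paths → Spec_detect_conflicts paths (detect_conflicts paths)

-- ===== LEMMAS AND PROOFS =====

-- proof-side characterizations (used only by the proofs below)

-- the condition 'agent bp occupies pos at time t' (A only looks at nonnegative t)
def pvCond (t : Int) (pos : Int × Int) (bp : Int × List (Int × Int)) : Bool :=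
  decide (0 ≤ t) && (PySem.List.pyGet? bp.2 t == some pos)

-- all agent ids occupying pos at time t, in ascending order
def pvAgentsAt (paths : List (List (Int × Int))) (t : Int) (pos : Int × Int) : List Int :=
  ((PySem.List.enumerate paths 0).filter (pvCond t pos)).map (fun bp => bp.1)

-- the conflict tuple A emits for agent ap at time t (none if ap is the first occupant or absent)
def pvConflictOf (paths : List (List (Int × Int))) (t : Int) (ap : Int × List (Int × Int)) :
    Option (Int × Int × (Int × Int) × Int) :=
  match PySem.List.pyGet? ap.2 t with
  | some pos =>
    match pvAgentsAt paths t pos with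
    | [] => none
    | f :: _ => if f = ap.1 then none else some (f, ap.1, pos, t)
  | none => none

def pvPerT (paths : List (List (Int × Int))) (t : Int) : List (Int × Int × (Int × Int) × Int) :=
  (PySem.List.enumerate paths 0).filterMap (pvConflictOf paths t)

-- the canonical conflict list: timestep-major, second-agent ascending
def pvLA (paths : List (List (Int × Int))) (M : Int) : List (Int × Int × (Int × Int) × Int) :=
  (PySem.List.pyRange 0 M 1).flatMap (pvPerT paths)

-- B's unsorted pair list
def pvP (paths : List (List (Int × Int))) : List (Int × Int × (Int × Int) × Int) :=
  ((pvGroups paths).items).flatMap pvEmit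

-- the sort key of Source B, lexicographic (timestep, second agent)
def pvKey (x : Int × Int × (Int × Int) × Int) : Lex (Int × Int) := toLex (x.2.2.2, x.2.1)

theorem pvGroupAdd_eq (i : Int) (g : PySem.Dict (Int × Int × Int) (List Int)) (tp : Int × Int × Int) :
    pvGroupAdd i g tp = g.insert tp (g.getD tp [] ++ [i]) := by
  unfold pvGroupAdd PySem.Dict.getD
  cases g.get? tp <;> simp

theorem pv_take_succ (paths : List (List (Int × Int))) (i : ℕ) (hi : i < paths.length) (t : Int) (pos : Int × Int) :
    pvAgentsAt (paths.take (i+1)) t pos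
      = pvAgentsAt (paths.take i) t pos
        ++ (if pvCond t pos ((i : Int), paths[i]) then [(i : Int)] else []) := by
  have h1 : paths.take (i+1) = paths.take i ++ [paths[i]] := by
    rw [List.take_succ, List.getElem?_eq_getElem hi]; rfl
  have hlen : (paths.take i).length = i := List.length_take_of_le (le_of_lt hi)
  unfold pvAgentsAt
  rw [h1, PySem.List.enumerate_append, List.filter_append, List.map_append, hlen]
  congr 1
  simp [PySem.List.enumerate_cons, PySem.List.enumerate_nil, List.filter]
  cases h : pvCond t pos ((i : Int), paths[i]) <;> simp [h]

theorem pv_agents_split (paths : List (List (Int × Int))) (i : ℕ) (hle : i ≤ paths.length) (t : Int) (pos : Int × Int) :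
    pvAgentsAt paths t pos
      = pvAgentsAt (paths.take i) t pos
        ++ ((PySem.List.enumerate (paths.drop i) (i : Int)).filter (pvCond t pos)).map (fun bp => bp.1) := by
  have hlen : (paths.take i).length = i := List.length_take_of_le hle
  conv_lhs => rw [pvAgentsAt, ← List.take_append_drop i paths]
  rw [PySem.List.enumerate_append, List.filter_append, List.map_append, hlen]
  simp [pvAgentsAt]

theorem mem_pvAgentsAt (paths : List (List (Int × Int))) (t : Int) (pos : Int × Int) (i : Int) :
    i ∈ pvAgentsAt paths t pos
      ↔ ∃ (k : ℕ) (h : k < paths.length), i = (k : Int) ∧ pvCond t pos ((k : Int), paths[k]) = true := by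
  unfold pvAgentsAt
  rw [List.mem_map]
  constructor
  · rintro ⟨bp, hbp, rfl⟩
    rw [List.mem_filter] at hbp
    obtain ⟨hmem, hc⟩ := hbp
    rw [PySem.List.mem_enumerate_iff] at hmem
    obtain ⟨k, hk, rfl⟩ := hmem
    refine ⟨k, hk, by simp, by simpa using hc⟩
  · rintro ⟨k, hk, rfl, hc⟩
    refine ⟨((k : Int), paths[k]), List.mem_filter.mpr ⟨?_, hc⟩, rfl⟩
    rw [PySem.List.mem_enumerate_iff]
    exact ⟨k, hk, by simp⟩

theorem pvAgentsAt_pairwise (paths : List (List (Int × Int))) (t : Int) (pos : Int × Int) :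
    (pvAgentsAt paths t pos).Pairwise (· < ·) := by
  unfold pvAgentsAt
  rw [List.pairwise_map]
  exact List.Pairwise.sublist (List.filter_sublist) (PySem.List.pairwise_lt_enumerate _ _)

theorem pv_groupfold_get? (i : Int) (p : List (Int × Int)) :
    ∀ (s : Int) (g : PySem.Dict (Int × Int × Int) (List Int)) (t : Int) (pos : Int × Int),
    ((PySem.List.enumerate p s).foldl (pvGroupAdd i) g).get? (t, pos)
      = if decide (s ≤ t) && (PySem.List.pyGet? p (t - s) == some pos)
        then some (g.getD (t, pos) [] ++ [i]) else g.get? (t, pos) := by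
  induction p with
  | nil =>
    intro s g t pos
    simp [PySem.List.enumerate_nil, PySem.List.pyGet?, PySem.List.pyIdx?]
  | cons q rest ih =>
    intro s g t pos
    rw [PySem.List.enumerate_cons, List.foldl_cons, ih]
    by_cases hts : t = s
    · subst hts
      have h1 : ¬ (t + 1 ≤ t) := by omega
      rw [pvGroupAdd_eq]
      by_cases hq : pos = q
      · subst hq
        simp [h1, PySem.Dict.get?_insert_self, PySem.List.pyGet?_zero_cons]
      · have hne : ((t, pos) : Int × Int × Int) ≠ (t, q) := by simp [hq]
        have hz : t - t = (0:Int) := by ring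
        have hqq : (some q == some pos) = false := by simpa using fun h => hq h.symm
        simp only [decide_eq_false h1, Bool.false_and, Bool.false_eq_true, if_false, hz,
          PySem.List.pyGet?_zero_cons, hqq, decide_eq_true_eq]
        rw [PySem.Dict.get?_insert_of_ne _ _ hne]
        simp
    · by_cases hlt : s + 1 ≤ t
      · have h0 : 0 ≤ t - s - 1 := by omega
        have hget : PySem.List.pyGet? (q :: rest) (t - s) = PySem.List.pyGet? rest (t - s - 1) := by
          rw [PySem.List.pyGet?_of_nonneg _ (by omega), PySem.List.pyGet?_of_nonneg _ h0]
          have : (t - s).toNat = (t - s - 1).toNat + 1 := by omega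
          rw [this]
          simp
        have hne : ((t, pos) : Int × Int × Int) ≠ (s, q) := by simp [hts]
        have hs : decide (s ≤ t) = true := by simp; omega
        have hs1 : decide (s + 1 ≤ t) = true := by simp [hlt]
        rw [pvGroupAdd_eq]
        have hsub : t - (s + 1) = t - s - 1 := by ring
        rw [hsub, hs1, hs, hget]
        simp only [Bool.true_and]
        rw [PySem.Dict.getD_insert_of_ne _ _ _ hne, PySem.Dict.get?_insert_of_ne _ _ hne]
      · have h1 : ¬ (s + 1 ≤ t) := hlt
        have h2 : ¬ (s ≤ t) := by omega
        have hne : ((t, pos) : Int × Int × Int) ≠ (s, q) := by simp [hts]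
        rw [pvGroupAdd_eq]
        simp [h1, h2, PySem.Dict.get?_insert_of_ne _ _ hne]

theorem pv_groups_aux (paths : List (List (Int × Int))) :
    ∀ (rest : List (List (Int × Int))) (i : ℕ), paths.drop i = rest →
    ∀ (g : PySem.Dict (Int × Int × Int) (List Int)),
    (∀ t pos, g.get? (t, pos)
        = if pvAgentsAt (paths.take i) t pos = [] then none else some (pvAgentsAt (paths.take i) t pos)) →
    ∀ t pos,
    ((PySem.List.enumerate rest (i : Int)).foldl
        (fun groups ap => (PySem.List.enumerate ap.2 0).foldl (pvGroupAdd ap.1) groups) g).get? (t, pos)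
      = if pvAgentsAt paths t pos = [] then none else some (pvAgentsAt paths t pos) := by
  intro rest
  induction rest with
  | nil =>
    intro i hdrop g hinv t pos
    have hlen : paths.length ≤ i := by
      by_contra h
      push_neg at h
      have := congrArg List.length hdrop
      simp at this
      omega
    have : paths.take i = paths := List.take_of_length_le hlen
    rw [PySem.List.enumerate_nil]
    simpa [this] using hinv t pos
  | cons p rest' ih =>
    intro i hdrop g hinv t pos
    have hi : i < paths.length := by
      by_contra h
      push_neg at h
      rw [List.drop_eq_nil_of_le h] at hdrop
      cases hdrop
    have hp : paths[i] = p := by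
      have h := congrArg (fun l => l[0]?) hdrop
      simp [List.getElem?_drop] at h
      simpa [List.getElem?_eq_getElem hi] using h
    have hdrop' : paths.drop (i + 1) = rest' := by
      have h : (paths.drop i).drop 1 = paths.drop (i + 1) := by rw [List.drop_drop]
      simpa [hdrop] using h.symm
    rw [PySem.List.enumerate_cons, List.foldl_cons]
    have hinv' : ∀ t pos,
        ((PySem.List.enumerate p 0).foldl (pvGroupAdd (i : Int)) g).get? (t, pos)
          = if pvAgentsAt (paths.take (i+1)) t pos = [] then none
            else some (pvAgentsAt (paths.take (i+1)) t pos) := by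
      intro t pos
      rw [pv_groupfold_get?, pv_take_succ paths i hi t pos, hp]
      have hcnd : (decide ((0:Int) ≤ t) && (PySem.List.pyGet? p (t - 0) == some pos))
          = pvCond t pos ((i : Int), p) := by
        simp [pvCond]
      rw [hcnd]
      cases hc : pvCond t pos ((i : Int), p) with
      | false =>
        rw [if_neg (by simp)]
        rw [hinv t pos]
        simp
      | true =>
        rw [if_pos rfl]
        have hgd : g.getD (t, pos) [] = pvAgentsAt (paths.take i) t pos := by
          unfold PySem.Dict.getD
          rw [hinv t pos]
          by_cases he : pvAgentsAt (paths.take i) t pos = [] <;> simp [he]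
        rw [hgd]
        simp
    have hrec := ih (i + 1) hdrop' _ hinv' t pos
    have hcast : ((i : Int) + 1) = ((i + 1 : ℕ) : Int) := by push_cast; ring
    rw [hcast]
    exact hrec

theorem pvGroups_get? (paths : List (List (Int × Int))) (t : Int) (pos : Int × Int) :
    (pvGroups paths).get? (t, pos)
      = if pvAgentsAt paths t pos = [] then none else some (pvAgentsAt paths t pos) := by
  have h0 : paths.drop 0 = paths := by simp
  have := pv_groups_aux paths paths 0 h0 PySem.Dict.empty
    (by intro t pos; simp [pvAgentsAt, PySem.List.enumerate_nil, PySem.Dict.get?_empty]) t pos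
  simpa using this

theorem pvGroups_nodup_keys (paths : List (List (Int × Int))) : (pvGroups paths).keys.Nodup := by
  unfold pvGroups
  have step : ∀ (l : List (Int × List (Int × Int))) (g : PySem.Dict (Int × Int × Int) (List Int)),
      g.keys.Nodup →
      (l.foldl (fun groups ap => (PySem.List.enumerate ap.2 0).foldl (pvGroupAdd ap.1) groups) g).keys.Nodup := by
    intro l
    induction l with
    | nil => intro g hg; exact hg
    | cons ap l' ih =>
      intro g hg
      rw [List.foldl_cons]
      apply ih
      have : (PySem.List.enumerate ap.2 0).foldl (pvGroupAdd ap.1) g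
          = (PySem.List.enumerate ap.2 0).foldl (fun d x => d.insert x (d.getD x [] ++ [ap.1])) g := by
        apply PySem.List.foldl_congr_mem
        intro acc x _
        exact pvGroupAdd_eq ap.1 acc x
      rw [this]
      exact PySem.Dict.nodup_keys_foldl_insert _ _ _ hg
  exact step _ _ (by simp [PySem.Dict.nodup_keys_empty])

theorem pv_mem_prefix_lt (paths : List (List (Int × Int))) (i : ℕ) (t : Int) (pos : Int × Int) (f : Int)
    (h : f ∈ pvAgentsAt (paths.take i) t pos) : f < (i : Int) := by
  rw [mem_pvAgentsAt] at h
  obtain ⟨k, hk, rfl, _⟩ := h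
  have : k < i := by
    have := List.length_take_le i paths
    omega
  exact_mod_cast this

theorem pv_innerA_eq (paths : List (List (Int × Int))) (t : Int) (ht : 0 ≤ t) :
    ∀ (rest : List (List (Int × Int))) (i : ℕ), paths.drop i = rest →
    ∀ (acc : List (Int × Int × (Int × Int) × Int)) (d : PySem.Dict (Int × Int) Int),
    (∀ pos, d.get? pos = (pvAgentsAt (paths.take i) t pos).head?) →
    ((PySem.List.enumerate rest (i : Int)).foldl (pvInnerA t) (acc, d)).1
      = acc ++ (PySem.List.enumerate rest (i : Int)).filterMap (pvConflictOf paths t) := by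
  intro rest
  induction rest with
  | nil =>
    intro i _ acc d _
    simp [PySem.List.enumerate_nil]
  | cons p rest' ih =>
    intro i hdrop acc d hinv
    have hi : i < paths.length := by
      by_contra h
      push_neg at h
      rw [List.drop_eq_nil_of_le h] at hdrop
      cases hdrop
    have hp : paths[i] = p := by
      have h := congrArg (fun l => l[0]?) hdrop
      simp [List.getElem?_drop] at h
      simpa [List.getElem?_eq_getElem hi] using h
    have hdrop' : paths.drop (i + 1) = rest' := by
      have h : (paths.drop i).drop 1 = paths.drop (i + 1) := by rw [List.drop_drop]
      simpa [hdrop] using h.symm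
    have hcast : ((i : Int) + 1) = ((i + 1 : ℕ) : Int) := by push_cast; ring
    rw [PySem.List.enumerate_cons, List.foldl_cons, List.filterMap_cons]
    by_cases hlt : t < (p.length : Int)
    · -- agent i has a position at time t
      have hsome : PySem.List.pyGet? p t = some p[t.toNat] := by
        apply PySem.List.pyGet?_eq_some_getElem <;> omega
      set pos := p[t.toNat] with hposdef
      have hcond : pvCond t pos ((i : Int), p) = true := by
        simp [pvCond, ht, hsome]
      -- full agents list at (t,pos) starts with the prefix
      have hsplit := pv_agents_split paths (i+1) (by omega) t pos
      have htake := pv_take_succ paths i hi t pos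
      rw [hp, if_pos hcond] at htake
      cases hd : d.get? pos with
      | some f =>
        -- prefix nonempty: A appends (f, i, pos, t); conflictOf agrees
        have hhead : (pvAgentsAt (paths.take i) t pos).head? = some f := by rw [← hinv pos, hd]
        obtain ⟨pf, hpre⟩ : ∃ pf, pvAgentsAt (paths.take i) t pos = f :: pf := by
          cases hl : pvAgentsAt (paths.take i) t pos with
          | nil => rw [hl] at hhead; cases hhead
          | cons a l => rw [hl] at hhead; simp at hhead; exact ⟨l, by rw [hhead]⟩
        have hfull : ∃ tl, pvAgentsAt paths t pos = f :: tl := by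
          rw [hsplit, htake, hpre]
          exact ⟨_, rfl⟩
        obtain ⟨tl, hfull⟩ := hfull
        have hflt : f < (i : Int) := pv_mem_prefix_lt paths i t pos f (by rw [hpre]; simp)
        have hco : pvConflictOf paths t ((i : Int), p) = some (f, (i : Int), pos, t) := by
          unfold pvConflictOf
          simp only [hsome, hfull]
          rw [if_neg (by intro h; omega)]
        have hstep : pvInnerA t (acc, d) ((i : Int), p) = (acc ++ [(f, (i : Int), pos, t)], d) := by
          unfold pvInnerA
          simp only [hlt, if_pos]
          rw [hsome]
          simp only []
          rw [hd]
        rw [hstep, hco]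
        -- invariant at i+1: heads unchanged
        have hinv' : ∀ pos', d.get? pos' = (pvAgentsAt (paths.take (i+1)) t pos').head? := by
          intro pos'
          by_cases he : pos' = pos
          · subst he
            rw [htake, hpre, hd]
            simp
          · have ht2 := pv_take_succ paths i hi t pos'
            rw [hp] at ht2
            have hcf : pvCond t pos' ((i : Int), p) = false := by
              simp [pvCond, hsome]
              intro _ h
              exact absurd h.symm he
            rw [ht2, if_neg (by simp [hcf]), List.append_nil]
            exact hinv pos'
        have hrec := ih (i + 1) hdrop' (acc ++ [(f, (i : Int), pos, t)]) d hinv'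
        rw [hcast]
        rw [hrec]
        simp
      | none =>
        -- prefix empty: A inserts; conflictOf for agent i is none (i is the first occupant)
        have hhead : (pvAgentsAt (paths.take i) t pos).head? = none := by rw [← hinv pos, hd]
        have hpre : pvAgentsAt (paths.take i) t pos = [] := by
          cases hl : pvAgentsAt (paths.take i) t pos with
          | nil => rfl
          | cons a l => rw [hl] at hhead; cases hhead
        have hfull : ∃ tl, pvAgentsAt paths t pos = (i : Int) :: tl := by
          rw [hsplit, htake, hpre]
          exact ⟨_, rfl⟩
        obtain ⟨tl, hfull⟩ := hfull
        have hco : pvConflictOf paths t ((i : Int), p) = none := by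
          unfold pvConflictOf
          simp only [hsome, hfull]
          simp
        have hstep : pvInnerA t (acc, d) ((i : Int), p) = (acc, d.insert pos (i : Int)) := by
          unfold pvInnerA
          simp only [hlt, if_pos]
          rw [hsome]
          simp only []
          rw [hd]
        rw [hstep, hco]
        have hinv' : ∀ pos', (d.insert pos (i : Int)).get? pos'
            = (pvAgentsAt (paths.take (i+1)) t pos').head? := by
          intro pos'
          by_cases he : pos' = pos
          · subst he
            rw [PySem.Dict.get?_insert_self, htake, hpre]
            simp
          · rw [PySem.Dict.get?_insert_of_ne _ _ he]
            have ht2 := pv_take_succ paths i hi t pos'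
            rw [hp] at ht2
            have hcf : pvCond t pos' ((i : Int), p) = false := by
              simp [pvCond, hsome]
              intro _ h
              exact absurd h.symm he
            rw [ht2, if_neg (by simp [hcf]), List.append_nil]
            exact hinv pos'
        have hrec := ih (i + 1) hdrop' acc (d.insert pos (i : Int)) hinv'
        rw [hcast, hrec]
    · -- agent i's path is too short: skip
      have hnone : PySem.List.pyGet? p t = none := by
        rw [PySem.List.pyGet?_of_nonneg _ ht]
        apply List.getElem?_eq_none
        omega
      have hco : pvConflictOf paths t ((i : Int), p) = none := by
        unfold pvConflictOf
        rw [hnone]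
      have hstep : pvInnerA t (acc, d) ((i : Int), p) = (acc, d) := by
        unfold pvInnerA
        rw [if_neg hlt]
      rw [hstep, hco]
      have hinv' : ∀ pos', d.get? pos' = (pvAgentsAt (paths.take (i+1)) t pos').head? := by
        intro pos'
        have ht2 := pv_take_succ paths i hi t pos'
        rw [hp] at ht2
        have hcf : pvCond t pos' ((i : Int), p) = false := by
          simp [pvCond, hnone]
        rw [ht2, if_neg (by simp [hcf]), List.append_nil]
        exact hinv pos'
      rw [hcast]
      exact ih (i + 1) hdrop' acc d hinv'

theorem pvA_eq_LA (paths : List (List (Int × Int))) (M : Int)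
    (hM : PySem.List.max? (paths.map (fun path => (path.length : Int))) (fun x => x) = some M) :
    detect_conflicts paths = pvLA paths M := by
  unfold detect_conflicts
  simp only [hM]
  unfold pvLA
  have hfl := PySem.List.foldl_append_eq_flatMap (pvPerT paths) (PySem.List.pyRange 0 M 1) []
  rw [List.nil_append] at hfl
  rw [← hfl]
  apply PySem.List.foldl_congr_mem
  intro acc t htm
  have ht : 0 ≤ t := (PySem.List.mem_pyRange_one.mp htm).1
  have h := pv_innerA_eq paths t ht paths 0 (by simp) acc PySem.Dict.empty
    (by intro pos; simp [pvAgentsAt, PySem.List.enumerate_nil, PySem.Dict.get?_empty])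
  simpa [pvPerT] using h

theorem mem_pvEmit (kv : (Int × Int × Int) × List Int) (x : Int × Int × (Int × Int) × Int)
    (h : x ∈ pvEmit kv) :
    ∃ f rest, kv.2 = f :: rest ∧ ∃ o ∈ rest, x = (f, o, kv.1.2, kv.1.1) := by
  unfold pvEmit at h
  cases hl : kv.2 with
  | nil => rw [hl] at h; cases h
  | cons f rest =>
    rw [hl] at h
    simp only [List.mem_map] at h
    obtain ⟨o, ho, rfl⟩ := h
    exact ⟨f, rest, rfl, o, ho, rfl⟩

theorem mem_pvP (paths : List (List (Int × Int))) (x : Int × Int × (Int × Int) × Int) :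
    x ∈ pvP paths
      ↔ ∃ t pos f rest, pvAgentsAt paths t pos = f :: rest ∧ ∃ o ∈ rest, x = (f, o, pos, t) := by
  unfold pvP
  rw [List.mem_flatMap]
  constructor
  · rintro ⟨kv, hkv, hx⟩
    have hget : (pvGroups paths).get? kv.1 = some kv.2 :=
      (PySem.Dict.get?_eq_some_iff_mem_items _ _ _ (pvGroups_nodup_keys paths)).mpr (by
        obtain ⟨k, v⟩ := kv; exact hkv)
    obtain ⟨f, rest, h2, o, ho, rfl⟩ := mem_pvEmit kv x hx
    refine ⟨kv.1.1, kv.1.2, f, rest, ?_, o, ho, rfl⟩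
    have hchar := pvGroups_get? paths kv.1.1 kv.1.2
    rw [show ((kv.1.1, kv.1.2) : Int × Int × Int) = kv.1 from Prod.eta kv.1, hget] at hchar
    by_cases he : pvAgentsAt paths kv.1.1 kv.1.2 = []
    · rw [if_pos he] at hchar; cases hchar
    · rw [if_neg he] at hchar
      injection hchar with h3
      rw [← h3, h2]
  · rintro ⟨t, pos, f, rest, hag, o, ho, rfl⟩
    refine ⟨((t, pos), f :: rest), ?_, ?_⟩
    · apply (PySem.Dict.get?_eq_some_iff_mem_items _ _ _ (pvGroups_nodup_keys paths)).mp
      rw [pvGroups_get? paths t pos, hag]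
      simp
    · unfold pvEmit
      simp only [List.mem_map]
      exact ⟨o, ho, rfl⟩

theorem mem_pvLA (paths : List (List (Int × Int))) (M : Int)
    (hM : PySem.List.max? (paths.map (fun path => (path.length : Int))) (fun x => x) = some M)
    (x : Int × Int × (Int × Int) × Int) :
    x ∈ pvLA paths M
      ↔ ∃ t pos f rest, pvAgentsAt paths t pos = f :: rest ∧ ∃ o ∈ rest, x = (f, o, pos, t) := by
  unfold pvLA pvPerT
  rw [List.mem_flatMap]
  constructor
  · rintro ⟨t, htm, hx⟩
    rw [List.mem_filterMap] at hx
    obtain ⟨ap, hap, hco⟩ := hx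
    have ht : 0 ≤ t := (PySem.List.mem_pyRange_one.mp htm).1
    rw [PySem.List.mem_enumerate_iff] at hap
    obtain ⟨k, hk, rfl⟩ := hap
    unfold pvConflictOf at hco
    cases hg : PySem.List.pyGet? paths[k] t with
    | none => rw [hg] at hco; cases hco
    | some pos =>
      simp only [hg] at hco
      cases hag : pvAgentsAt paths t pos with
      | nil => rw [hag] at hco; cases hco
      | cons f rest =>
        simp only [hag] at hco
        by_cases hf : f = 0 + (k : Int)
        · rw [if_pos hf] at hco; cases hco
        · rw [if_neg hf] at hco
          injection hco with hco
          refine ⟨t, pos, f, rest, hag, (k : Int), ?_, by rw [← hco]; simp⟩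
          have hmem : ((k : Int)) ∈ pvAgentsAt paths t pos := by
            rw [mem_pvAgentsAt]
            exact ⟨k, hk, rfl, by simp [pvCond, ht, hg]⟩
          rw [hag] at hmem
          cases List.mem_cons.mp hmem with
          | inl h => exact absurd (by simpa using h.symm) (by simpa using hf)
          | inr h => exact h
  · rintro ⟨t, pos, f, rest, hag, o, ho, rfl⟩
    have hfo : f < o := by
      have := pvAgentsAt_pairwise paths t pos
      rw [hag, List.pairwise_cons] at this
      exact this.1 o ho
    have homem : o ∈ pvAgentsAt paths t pos := by rw [hag]; exact List.mem_cons_of_mem _ ho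
    rw [mem_pvAgentsAt] at homem
    obtain ⟨k, hk, rfl, hc⟩ := homem
    unfold pvCond at hc
    simp only [Bool.and_eq_true, decide_eq_true_eq, beq_iff_eq] at hc
    obtain ⟨ht, hg⟩ := hc
    have htM : t < M := by
      have hlen : t < (paths[k].length : Int) := by
        rw [PySem.List.pyGet?_of_nonneg _ ht] at hg
        obtain ⟨hlt', -⟩ := List.getElem?_eq_some_iff.mp hg
        omega
      have hle : (paths[k].length : Int) ≤ M :=
        PySem.List.max?_isMax hM _ (List.mem_map.mpr ⟨paths[k], by simp [List.getElem_mem], rfl⟩)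
      omega
    refine ⟨t, PySem.List.mem_pyRange_one.mpr ⟨ht, htM⟩, ?_⟩
    rw [List.mem_filterMap]
    refine ⟨(0 + (k : Int), paths[k]), ?_, ?_⟩
    · rw [PySem.List.mem_enumerate_iff]; exact ⟨k, hk, rfl⟩
    · unfold pvConflictOf
      simp only [hg, hag]
      rw [if_neg (by intro h; have h' : f = 0 + (k : Int) := h; omega)]
      simp

theorem pvConflictOf_shape (paths : List (List (Int × Int))) (t : Int) (ap : Int × List (Int × Int))
    (x : Int × Int × (Int × Int) × Int) (h : pvConflictOf paths t ap = some x) :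
    x.2.2.2 = t ∧ x.2.1 = ap.1 := by
  unfold pvConflictOf at h
  cases hg : PySem.List.pyGet? ap.2 t with
  | none => rw [hg] at h; cases h
  | some pos =>
    simp only [hg] at h
    cases hag : pvAgentsAt paths t pos with
    | nil => rw [hag] at h; cases h
    | cons f rest =>
      simp only [hag] at h
      by_cases hf : f = ap.1
      · rw [if_pos hf] at h; cases h
      · rw [if_neg hf] at h
        injection h with h
        rw [← h]
        exact ⟨rfl, rfl⟩

theorem pvKey_lt (a b : Int × Int × (Int × Int) × Int) :
    pvKey a < pvKey b ↔ (a.2.2.2 < b.2.2.2 ∨ (a.2.2.2 = b.2.2.2 ∧ a.2.1 < b.2.1)) := by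
  unfold pvKey
  rw [Prod.Lex.lt_iff]
  simp

theorem pvLA_pairwise (paths : List (List (Int × Int))) (M : Int) :
    (pvLA paths M).Pairwise (fun a b => pvKey a < pvKey b) := by
  unfold pvLA pvPerT
  rw [List.pairwise_flatMap]
  constructor
  · intro t _
    rw [List.pairwise_filterMap]
    apply List.Pairwise.imp_of_mem (R := fun p q => p.1 < q.1)
    · intro ap ap' _ _ hlt b hb b' hb'
      obtain ⟨hbt, hba⟩ := pvConflictOf_shape paths t ap b hb
      obtain ⟨hbt', hba'⟩ := pvConflictOf_shape paths t ap' b' hb'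
      rw [pvKey_lt]
      right
      exact ⟨by rw [hbt, hbt'], by rw [hba, hba']; exact hlt⟩
    · exact PySem.List.pairwise_lt_enumerate _ _
  · apply List.Pairwise.imp_of_mem (R := (· < ·))
    · intro t t' _ _ hlt x hx y hy
      rw [List.mem_filterMap] at hx hy
      obtain ⟨ap, _, hco⟩ := hx
      obtain ⟨ap', _, hco'⟩ := hy
      obtain ⟨hxt, -⟩ := pvConflictOf_shape paths t ap x hco
      obtain ⟨hyt, -⟩ := pvConflictOf_shape paths t' ap' y hco'
      rw [pvKey_lt]
      left
      rw [hxt, hyt]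
      exact hlt
    · exact PySem.List.pairwise_lt_pyRange_one 0 M

theorem pvLA_nodup (paths : List (List (Int × Int))) (M : Int) : (pvLA paths M).Nodup := by
  apply List.Pairwise.imp_of_mem (R := fun a b => pvKey a < pvKey b) ?_ (pvLA_pairwise paths M)
  intro a b _ _ hlt he
  rw [he] at hlt
  exact lt_irrefl _ hlt

theorem pvP_nodup (paths : List (List (Int × Int))) : (pvP paths).Nodup := by
  unfold pvP
  have hnd := pvGroups_nodup_keys paths
  show List.Pairwise (fun a b => a ≠ b) (List.flatMap pvEmit (pvGroups paths).items)
  rw [List.pairwise_flatMap]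
  constructor
  · intro kv hkv
    have hget : (pvGroups paths).get? kv.1 = some kv.2 :=
      (PySem.Dict.get?_eq_some_iff_mem_items _ _ _ hnd).mpr (by obtain ⟨k, v⟩ := kv; exact hkv)
    have hchar := pvGroups_get? paths kv.1.1 kv.1.2
    rw [Prod.eta, hget] at hchar
    by_cases he : pvAgentsAt paths kv.1.1 kv.1.2 = []
    · rw [if_pos he] at hchar; cases hchar
    · rw [if_neg he] at hchar
      injection hchar with h3
      unfold pvEmit
      cases hl : kv.2 with
      | nil => exact List.nodup_nil
      | cons f rest =>
        apply List.Nodup.map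
        · intro a b hab
          injection hab with _ hab
          injection hab
        · have hpw := pvAgentsAt_pairwise paths kv.1.1 kv.1.2
          rw [← h3, hl] at hpw
          rw [List.pairwise_cons] at hpw
          exact hpw.2.imp (fun h => ne_of_lt h)
  · -- chunks from distinct keys are element-disjoint
    have hkeys : ((pvGroups paths).items).Pairwise (fun kv kv' => kv.1 ≠ kv'.1) := by
      have h : ((pvGroups paths).items.map (fun p => p.1)).Nodup := hnd
      exact List.pairwise_map.mp h
    apply List.Pairwise.imp_of_mem ?_ hkeys
    intro kv kv' _ _ hne x hx y hy
    obtain ⟨f, rest, h2, o, ho, rfl⟩ := mem_pvEmit kv x hx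
    obtain ⟨f', rest', h2', o', ho', rfl⟩ := mem_pvEmit kv' y hy
    intro heq
    injection heq with e1 heq
    injection heq with e2 heq
    injection heq with e3 e4
    exact hne (Prod.ext e4 e3)

theorem pv_sorted2_eq_sorted_lex {α : Type} (xs : List α) (k1 k2 : α → Int) :
    PySem.List.sorted2 xs k1 k2 = PySem.List.sorted xs (fun x => toLex (k1 x, k2 x)) := by
  unfold PySem.List.sorted2 PySem.List.sorted
  simp only [if_neg (by simp : ¬ (false = true))]
  have hcmp : (fun a b => decide (k1 a < k1 b) || (!decide (k1 b < k1 a) && decide (k2 a < k2 b)))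
      = (fun a b => decide (toLex (k1 a, k2 a) < toLex (k1 b, k2 b))) := by
    funext a b
    rw [Bool.eq_iff_iff]
    simp only [Bool.or_eq_true, Bool.and_eq_true, Bool.not_eq_eq_eq_not, Bool.not_true,
      decide_eq_true_eq, decide_eq_false_iff_not, Prod.Lex.lt_iff]
    constructor
    · rintro (h | ⟨h1, h2⟩)
      · exact Or.inl h
      · rcases lt_trichotomy (k1 a) (k1 b) with h3 | h3 | h3
        · exact Or.inl h3
        · exact Or.inr ⟨by simpa using h3, by simpa using h2⟩
        · exact absurd h3 h1
    · rintro (h | ⟨h1, h2⟩)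
      · exact Or.inl h
      · right
        constructor
        · simp at h1; omega
        · simpa using h2
  rw [hcmp]

theorem pvAlt_eq_LA (paths : List (List (Int × Int))) (M : Int)
    (hM : PySem.List.max? (paths.map (fun path => (path.length : Int))) (fun x => x) = some M) :
    detect_conflicts_alt paths = pvLA paths M := by
  unfold detect_conflicts_alt
  have hfl := PySem.List.foldl_append_eq_flatMap pvEmit ((pvGroups paths).items) []
  rw [List.nil_append] at hfl
  rw [hfl]
  rw [pv_sorted2_eq_sorted_lex]
  apply PySem.List.sorted_eq_of_perm_of_pairwise_lt
  · show (pvLA paths M).Perm (pvP paths)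
    rw [List.perm_ext_iff_of_nodup (pvLA_nodup paths M) (pvP_nodup paths)]
    intro a
    rw [mem_pvLA paths M hM a, mem_pvP paths a]
  · have h := pvLA_pairwise paths M
    apply h.imp
    intro a b hab
    rw [pvKey_lt] at hab
    rw [Prod.Lex.lt_iff]
    simpa using hab

-- ===== VERDICT (by name: the statements are the Claim_ definitions above) =====
theorem detect_conflicts_spec : Claim_equal_detect_conflicts := by
  intro paths _ hpre
  unfold Spec_detect_conflicts
  obtain ⟨M, hM⟩ : ∃ M, PySem.List.max? (paths.map (fun path => (path.length : Int))) (fun x => x) = some M := by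
    cases h : PySem.List.max? (paths.map (fun path => (path.length : Int))) (fun x => x) with
    | none => exact absurd (List.map_eq_nil_iff.mp ((PySem.List.max?_eq_none_iff _ _).mp h)) hpre
    | some m => exact ⟨m, rfl⟩
  rw [pvA_eq_LA paths M hM, pvAlt_eq_LA paths M hM]
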